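-- pv_equiv track=rewrite | github.com/SPFlow/SPFlow | spflow/utils/visualization.py | _format_scope_string
-- ===== SOURCE A (Python) =====
-- def _format_scope_string(scopes: list[int]) -> str:
--     """Format a list of scope indices, using ranges for consecutive sequences.
--
--     Consecutive sequences of 3 or more indices are represented as ranges (e.g., "0...4").
--     Shorter consecutive sequences are listed individually.
--
--     Args:
--         scopes: List of scope indices.
--
--     Returns:
--         Formatted scope string with ranges for consecutive sequences.
--     """
--     if not scopes:
--         return ""
--
--     # Sort and deduplicate
--     sorted_scopes = sorted(set(scopes))
--
--     result = []
--     i = 0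
--
--     while i < len(sorted_scopes):
--         start = sorted_scopes[i]
--         end = start
--
--         # Find the end of the consecutive sequence
--         while i + 1 < len(sorted_scopes) and sorted_scopes[i + 1] == sorted_scopes[i] + 1:
--             i += 1
--             end = sorted_scopes[i]
--
--         # Determine if we should use a range (4 or more consecutive)
--         sequence_length = end - start + 1
--         if sequence_length >= 3:
--             # Use range for 3+ consecutive numbers
--             result.append(f"{start}...{end}")
--         else:
--             # List individually for 1-3 numbers
--             result.append(", ".join(str(x) for x in range(start, end + 1)))
--
--         i += 1
--
--     return ", ".join(result)
-- ===== SOURCE B (Python) =====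
-- def _format_scope_string(scopes: list[int]) -> str:
--     """Set-algebra reformulation: a value v starts a maximal consecutive run iff
--     v-1 is absent from the set, and ends one iff v+1 is absent; the sorted start
--     and end lists pair up positionally into the runs. No neighbour scanning."""
--     if not scopes:
--         return ""
--     present = set(scopes)
--     starts = sorted(v for v in present if v - 1 not in present)
--     ends = sorted(v for v in present if v + 1 not in present)
--     pieces = []
--     for a, b in zip(starts, ends):
--         if b - a + 1 >= 3:
--             pieces.append(f"{a}...{b}")
--         else:
--             pieces.append(", ".join(str(x) for x in range(a, b + 1)))
--     return ", ".join(pieces)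
-- ===== Notes on version B (the rewrite author's own statement) =====
-- stated objective: alternative
-- what changed: Replaces A's index-based adjacent-neighbour scan over the sorted list by set algebra: run starts are the values v with v-1 not in the set, run ends the values with v+1 not in the set, and zipping the two sorted lists yields the runs without any scanning or run-state tracking.
import Mathlib
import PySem

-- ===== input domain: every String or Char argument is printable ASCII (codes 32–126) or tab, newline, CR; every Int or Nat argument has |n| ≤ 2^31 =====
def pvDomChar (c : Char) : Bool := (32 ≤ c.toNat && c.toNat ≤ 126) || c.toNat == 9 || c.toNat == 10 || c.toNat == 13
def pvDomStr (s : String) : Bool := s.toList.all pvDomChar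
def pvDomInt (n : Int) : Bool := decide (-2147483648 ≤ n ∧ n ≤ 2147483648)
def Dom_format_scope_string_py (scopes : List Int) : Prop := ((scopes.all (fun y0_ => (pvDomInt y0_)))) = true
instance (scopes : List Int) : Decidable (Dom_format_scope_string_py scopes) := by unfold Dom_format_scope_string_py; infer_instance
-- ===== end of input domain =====

-- B replaces A's neighbour-scanning while-loops over the sorted list by set algebra:
-- run starts are the values v with v-1 not in the set, run ends those with v+1 not in
-- the set, and zipping the two sorted lists yields the runs; objective: alternative
-- (no scanning, no run state), same O(n log n) cost.

-- ===== PORT A =====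
-- inner while loop of A: advance i while s[i+1] == s[i] + 1.
-- Indices are loop counters (Nat) and every access is guarded in range, so List.getD is exact here.
def pvFindRunEnd (s : List Int) (i : Nat) : Nat :=
  if i + 1 < s.length ∧ s.getD (i + 1) 0 = s.getD i 0 + 1 then pvFindRunEnd s (i + 1) else i
termination_by s.length - i
decreasing_by omega

theorem pvFindRunEnd_ge (s : List Int) (i : Nat) : i ≤ pvFindRunEnd s i := by
  unfold pvFindRunEnd
  split
  · have := pvFindRunEnd_ge s (i + 1); omega
  · omega
termination_by s.length - i
decreasing_by omega

-- outer while loop of A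
def pvLoopA (s : List Int) (i : Nat) (result : List String) : List String :=
  if _h : i < s.length then
    let start := s.getD i 0
    let j := pvFindRunEnd s i
    let e := s.getD j 0
    let piece :=
      if e - start + 1 ≥ 3 then PySem.Int.toStr start ++ "..." ++ PySem.Int.toStr e
      else PySem.Str.join ", " ((PySem.List.pyRange start (e + 1) 1).map PySem.Int.toStr)
    pvLoopA s (j + 1) (result ++ [piece])
  else result
termination_by s.length - i
decreasing_by have := pvFindRunEnd_ge s i; omega

def format_scope_string_py (scopes : List Int) : String :=
  if scopes = [] then ""
  else
    PySem.Str.join ", "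
      (pvLoopA (PySem.List.sorted (PySem.Set.ofList scopes) (fun x => x) false) 0 [])

-- ===== PORT B =====
-- piece formatting shared by the run (a, b), as in Source B's loop body
def pvPiece (a b : Int) : String :=
  if b - a + 1 ≥ 3 then PySem.Int.toStr a ++ "..." ++ PySem.Int.toStr b
  else PySem.Str.join ", " ((PySem.List.pyRange a (b + 1) 1).map PySem.Int.toStr)

def format_scope_string_py_alt (scopes : List Int) : String :=
  if scopes = [] then ""
  else
    let present := PySem.Set.ofList scopes
    let starts := PySem.List.sorted
      (present.filter (fun v => !(PySem.Set.contains present (v - 1)))) (fun x => x) false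
    let ends := PySem.List.sorted
      (present.filter (fun v => !(PySem.Set.contains present (v + 1)))) (fun x => x) false
    PySem.Str.join ", " ((starts.zip ends).map (fun p => pvPiece p.1 p.2))

-- ===== PRECONDITION & SPEC =====
def Spec_format_scope_string_py (scopes : List Int) (out : String) : Prop := out = format_scope_string_py_alt scopes
instance (scopes : List Int) (out : String) : Decidable (Spec_format_scope_string_py scopes out) := by unfold Spec_format_scope_string_py; infer_instance

-- ===== CLAIM (what is proved, stated in full; the proofs are below) =====
def Claim_equal_format_scope_string_py : Prop := ∀ (scopes : List Int), Dom_format_scope_string_py scopes → Spec_format_scope_string_py scopes (format_scope_string_py scopes)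

-- ===== LEMMAS AND PROOFS =====

-- proof-only characterisation: the maximal-run decomposition of a strictly increasing list
def pvRuns (start prev : Int) : List Int → List (Int × Int)
  | [] => [(start, prev)]
  | v :: vs => if v = prev + 1 then pvRuns start v vs else (start, prev) :: pvRuns v v vs

-- A's pieces, run by run
def pvRunsSpec (start prev : Int) : List Int → List String
  | [] => [pvPiece start prev]
  | v :: vs =>
    if v = prev + 1 then pvRunsSpec start v vs
    else pvPiece start prev :: pvRunsSpec v v vs

theorem pvRunsSpec_eq_map (t : List Int) : ∀ start prev : Int,
    pvRunsSpec start prev t = (pvRuns start prev t).map (fun p => pvPiece p.1 p.2) := by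
  induction t with
  | nil => intro start prev; simp [pvRunsSpec, pvRuns]
  | cons v vs ih =>
    intro start prev
    simp only [pvRunsSpec, pvRuns]
    by_cases h : v = prev + 1
    · simp [h, ih]
    · simp [h, ih]

theorem pvRunEnd_spec (s : List Int) : ∀ i, i < s.length → ∀ start : Int,
    pvRunsSpec start (s.getD i 0) (s.drop (i + 1)) =
      (if pvFindRunEnd s i + 1 < s.length then
        pvPiece start (s.getD (pvFindRunEnd s i) 0) ::
          pvRunsSpec (s.getD (pvFindRunEnd s i + 1) 0) (s.getD (pvFindRunEnd s i + 1) 0)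
            (s.drop (pvFindRunEnd s i + 2))
      else [pvPiece start (s.getD (pvFindRunEnd s i) 0)]) := by
  intro i hi start
  rw [pvFindRunEnd]
  by_cases hc : i + 1 < s.length ∧ s.getD (i + 1) 0 = s.getD i 0 + 1
  · -- run continues: s[i+1] = s[i]+1
    rw [if_pos hc]
    have h1 : i + 1 < s.length := hc.1
    rw [List.drop_eq_getElem_cons h1]
    have hg : s[i + 1] = s.getD (i + 1) 0 := (List.getD_eq_getElem s 0 h1).symm
    rw [pvRunsSpec, hg, if_pos hc.2]
    exact pvRunEnd_spec s (i + 1) h1 start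
  · rw [if_neg hc]
    by_cases h1 : i + 1 < s.length
    · rw [if_pos h1, List.drop_eq_getElem_cons h1]
      have hne : ¬ s[i + 1] = s.getD i 0 + 1 := by
        intro h; exact hc ⟨h1, by rw [List.getD_eq_getElem s 0 h1]; exact h⟩
      rw [pvRunsSpec, if_neg hne, List.getD_eq_getElem s 0 h1]
    · rw [if_neg h1, List.drop_eq_nil_of_le (by omega), pvRunsSpec]
termination_by i => s.length - i
decreasing_by omega

theorem pvLoopA_spec (s : List Int) : ∀ i (acc : List String), i < s.length →
    pvLoopA s i acc = acc ++ pvRunsSpec (s.getD i 0) (s.getD i 0) (s.drop (i + 1)) := by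
  intro i acc hi
  rw [pvLoopA, dif_pos hi, pvRunEnd_spec s i hi]
  have hji := pvFindRunEnd_ge s i
  by_cases hj : pvFindRunEnd s i + 1 < s.length
  · rw [if_pos hj, pvLoopA_spec s (pvFindRunEnd s i + 1) _ hj]
    simp [pvPiece]
  · rw [if_neg hj, pvLoopA, dif_neg (by omega)]
    simp [pvPiece]
termination_by i => s.length - i
decreasing_by have := pvFindRunEnd_ge s i; omega

-- B side: the filtered sorted list of run starts is exactly the first components of the runs
theorem pvRuns_fst (t : List Int) : ∀ (P : List Int) (start prev : Int),
    prev ∈ P → (∀ x : Int, prev < x → (x ∈ P ↔ x ∈ t)) → (∀ x ∈ t, prev < x) →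
    t.Pairwise (· < ·) →
    start :: t.filter (fun v => !(PySem.Set.contains P (v - 1))) =
      (pvRuns start prev t).map Prod.fst := by
  induction t with
  | nil => intro P start prev _ _ _ _; simp [pvRuns]
  | cons v vs ih =>
    intro P start prev hprev hinv hgt hpw
    have hvP : v ∈ P := (hinv v (hgt v (by simp))).mpr (by simp)
    have hinv' : ∀ x : Int, v < x → (x ∈ P ↔ x ∈ vs) := by
      intro x hx
      rw [hinv x (lt_trans (hgt v (by simp)) hx)]
      simp only [List.mem_cons]
      constructor
      · rintro (h1 | h1)
        · omega
        · exact h1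
      · exact Or.inr
    have hgt' : ∀ x ∈ vs, v < x := fun x hx => (List.pairwise_cons.mp hpw).1 x hx
    have hpw' : vs.Pairwise (· < ·) := (List.pairwise_cons.mp hpw).2
    simp only [pvRuns]
    by_cases h : v = prev + 1
    · -- v continues the run: v-1 = prev ∈ P, so v is not a start
      have hc : v - 1 ∈ P := by
        have hv1 : v - 1 = prev := by omega
        rw [hv1]; exact hprev
      rw [if_pos h, List.filter_cons_of_neg (by simp [hc])]
      exact ih P start v hvP hinv' hgt' hpw'
    · -- gap before v: v-1 ∉ P, so v is a start
      have hvgt : prev < v := hgt v (by simp)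
      have hc : v - 1 ∉ P := by
        intro hm
        have : v - 1 ∈ v :: vs := (hinv (v - 1) (by omega)).mp hm
        rcases List.mem_cons.mp this with h1 | h1
        · omega
        · have := hgt' _ h1; omega
      rw [if_neg h, List.filter_cons_of_pos (by simp [hc]), List.map_cons]
      exact congrArg (List.cons start) (ih P v v hvP hinv' hgt' hpw')
  
-- B side: the filtered sorted list of run ends is exactly the second components of the runs
theorem pvRuns_snd (t : List Int) : ∀ (P : List Int) (start prev : Int),
    (∀ x : Int, prev < x → (x ∈ P ↔ x ∈ t)) → (∀ x ∈ t, prev < x) →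
    t.Pairwise (· < ·) →
    (prev :: t).filter (fun v => !(PySem.Set.contains P (v + 1))) =
      (pvRuns start prev t).map Prod.snd := by
  induction t with
  | nil =>
    intro P start prev hinv _ _
    have hc : prev + 1 ∉ P := by
      intro hm
      have := (hinv (prev + 1) (by omega)).mp hm
      simp at this
    simp [pvRuns, hc]
  | cons v vs ih =>
    intro P start prev hinv hgt hpw
    have hinv' : ∀ x : Int, v < x → (x ∈ P ↔ x ∈ vs) := by
      intro x hx
      rw [hinv x (lt_trans (hgt v (by simp)) hx)]
      simp only [List.mem_cons]
      constructor
      · rintro (h1 | h1)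
        · omega
        · exact h1
      · exact Or.inr
    have hgt' : ∀ x ∈ vs, v < x := fun x hx => (List.pairwise_cons.mp hpw).1 x hx
    have hpw' : vs.Pairwise (· < ·) := (List.pairwise_cons.mp hpw).2
    simp only [pvRuns]
    by_cases h : v = prev + 1
    · -- run continues: prev+1 = v ∈ P, so prev is not an end
      have hc : prev + 1 ∈ P := by
        rw [← h]
        exact (hinv v (hgt v (by simp))).mpr (by simp)
      rw [if_pos h, List.filter_cons_of_neg (by simp [hc])]
      exact ih P start v hinv' hgt' hpw'
    · -- gap after prev: prev+1 ∉ P, so prev is an end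
      have hvgt : prev < v := hgt v (by simp)
      have hc : prev + 1 ∉ P := by
        intro hm
        have : prev + 1 ∈ v :: vs := (hinv (prev + 1) (by omega)).mp hm
        rcases List.mem_cons.mp this with h1 | h1
        · omega
        · have := hgt' _ h1; omega
      rw [List.filter_cons_of_pos (by simp [hc]), if_neg h, List.map_cons]
      exact congrArg (List.cons prev) (ih P v v hinv' hgt' hpw')

-- ===== VERDICT (by name: the statement is the Claim_ definition above) =====
theorem format_scope_string_py_spec : Claim_equal_format_scope_string_py := by
  intro scopes _
  unfold Spec_format_scope_string_py format_scope_string_py format_scope_string_py_alt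
  by_cases h : scopes = []
  · simp [h]
  · rw [if_neg h, if_neg h]
    have hs : PySem.List.sorted (PySem.Set.ofList scopes) (fun x => x) false ≠ [] := by
      intro hnil
      have he : PySem.Set.ofList scopes = [] := (PySem.List.sorted_eq_nil_iff _ _ _).mp hnil
      cases scopes with
      | nil => exact h rfl
      | cons a as =>
        have ha : a ∈ PySem.Set.ofList (a :: as) := by rw [PySem.Set.mem_ofList]; simp
        rw [he] at ha; cases ha
    have hperm : (PySem.List.sorted (PySem.Set.ofList scopes) (fun x => x) false).Perm
        (PySem.Set.ofList scopes) := PySem.List.sorted_perm _ _ _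
    have hlt : (PySem.List.sorted (PySem.Set.ofList scopes) (fun x => x) false).Pairwise (· < ·) :=
      PySem.List.sorted_ofList_pairwise_lt scopes
    cases hseq : PySem.List.sorted (PySem.Set.ofList scopes) (fun x => x) false with
    | nil => exact absurd hseq hs
    | cons hd t =>
      rw [hseq] at hperm hlt
      have hgt : ∀ x ∈ t, hd < x := fun x hx => (List.pairwise_cons.mp hlt).1 x hx
      have hpw : t.Pairwise (· < ·) := (List.pairwise_cons.mp hlt).2
      have hinv : ∀ x : Int, hd < x → (x ∈ PySem.Set.ofList scopes ↔ x ∈ t) := by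
        intro x hx
        rw [← hperm.mem_iff]
        simp only [List.mem_cons]
        constructor
        · rintro (h1 | h1)
          · omega
          · exact h1
        · exact Or.inr
      have hhd : hd ∈ PySem.Set.ofList scopes := hperm.mem_iff.mp (by simp)
      -- starts
      have hstarts : PySem.List.sorted
          ((PySem.Set.ofList scopes).filter
            (fun v => !(PySem.Set.contains (PySem.Set.ofList scopes) (v - 1)))) (fun x => x) false =
          (pvRuns hd hd t).map Prod.fst := by
        have hfp : ((hd :: t).filter
            (fun v => !(PySem.Set.contains (PySem.Set.ofList scopes) (v - 1)))).Perm
            ((PySem.Set.ofList scopes).filter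
              (fun v => !(PySem.Set.contains (PySem.Set.ofList scopes) (v - 1)))) :=
          hperm.filter _
        have hfl : ((hd :: t).filter
            (fun v => !(PySem.Set.contains (PySem.Set.ofList scopes) (v - 1)))).Pairwise (· < ·) :=
          List.Pairwise.filter _ hlt
        rw [PySem.List.sorted_eq_of_perm_of_pairwise_lt _ _ _ hfp hfl]
        have hchd : hd - 1 ∉ scopes := by
          intro hsc
          have hm : hd - 1 ∈ PySem.Set.ofList scopes := by
            rw [PySem.Set.mem_ofList]; exact hsc
          rcases List.mem_cons.mp (hperm.mem_iff.mpr hm) with h1 | h1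
          · omega
          · have := hgt _ h1; omega
        rw [List.filter_cons_of_pos (by simp [hchd])]
        exact pvRuns_fst t (PySem.Set.ofList scopes) hd hd hhd hinv hgt hpw
      -- ends
      have hends : PySem.List.sorted
          ((PySem.Set.ofList scopes).filter
            (fun v => !(PySem.Set.contains (PySem.Set.ofList scopes) (v + 1)))) (fun x => x) false =
          (pvRuns hd hd t).map Prod.snd := by
        have hfp : ((hd :: t).filter
            (fun v => !(PySem.Set.contains (PySem.Set.ofList scopes) (v + 1)))).Perm
            ((PySem.Set.ofList scopes).filter
              (fun v => !(PySem.Set.contains (PySem.Set.ofList scopes) (v + 1)))) :=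
          hperm.filter _
        have hfl : ((hd :: t).filter
            (fun v => !(PySem.Set.contains (PySem.Set.ofList scopes) (v + 1)))).Pairwise (· < ·) :=
          List.Pairwise.filter _ hlt
        rw [PySem.List.sorted_eq_of_perm_of_pairwise_lt _ _ _ hfp hfl]
        exact pvRuns_snd t (PySem.Set.ofList scopes) hd hd hinv hgt hpw
      rw [pvLoopA_spec _ 0 [] (by simp)]
      simp only [List.getD_cons_zero, List.drop_succ_cons, List.drop_zero, List.nil_append]
      simp only [hstarts, hends]
      have hz : (List.map Prod.fst (pvRuns hd hd t)).zip (List.map Prod.snd (pvRuns hd hd t)) =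
          pvRuns hd hd t := Eq.symm (List.zip_of_prod rfl rfl)
      rw [hz, pvRunsSpec_eq_map]
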